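-- pv_equiv track=rewrite | github.com/ChunhuaLab/PMSPcnn | code/features/PSSM/pssmviewer.py | PSSM_matrix
-- ===== SOURCE A (Python) =====
-- def PSSM_matrix(d,x, pssmBox):
--     num = d[x + 3:x + 23]
--     num1 = d[x+1]#add
--     outLine = ''
--     count =0
--     for j in num:
--         count=count+1
--
--         if count == 19:
--             line = num1.replace(',\n', '')
--             outLine = outLine + line
--         else:
--             line = j.replace(',\n', '')
--             outLine = outLine + line
--
--     pssmBox.append(outLine)
--     if x + 28 <= len(d) - 30:
--         call = PSSM_matrix(d,x + 28, pssmBox)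
--     return pssmBox
-- ===== SOURCE B (Python) =====
-- # Iterative while-loop version of the tail recursion; builds each row with a
-- # join over enumerate instead of a counter + string accumulator.
-- # Like A, it appends to pssmBox in place; the proved equivalence is about the
-- # return value (both mutate identically).
-- def PSSM_matrix(d, x, pssmBox):
--     while True:
--         num = d[x + 3:x + 23]
--         num1 = d[x + 1]
--         pssmBox.append(''.join(
--             (num1 if i == 18 else s).replace(',\n', '')
--             for i, s in enumerate(num)))
--         if x + 28 <= len(d) - 30:
--             x += 28
--         else:
--             break
--     return pssmBox
-- ===== Notes on version B (the rewrite author's own statement) =====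
-- stated objective: simpler
-- what changed: The tail recursion becomes an explicit while loop over the index x, and each row is built by ''.join over enumerate(slice) with the i==18 substitution instead of a count accumulator with repeated string concatenation.
import Mathlib
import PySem

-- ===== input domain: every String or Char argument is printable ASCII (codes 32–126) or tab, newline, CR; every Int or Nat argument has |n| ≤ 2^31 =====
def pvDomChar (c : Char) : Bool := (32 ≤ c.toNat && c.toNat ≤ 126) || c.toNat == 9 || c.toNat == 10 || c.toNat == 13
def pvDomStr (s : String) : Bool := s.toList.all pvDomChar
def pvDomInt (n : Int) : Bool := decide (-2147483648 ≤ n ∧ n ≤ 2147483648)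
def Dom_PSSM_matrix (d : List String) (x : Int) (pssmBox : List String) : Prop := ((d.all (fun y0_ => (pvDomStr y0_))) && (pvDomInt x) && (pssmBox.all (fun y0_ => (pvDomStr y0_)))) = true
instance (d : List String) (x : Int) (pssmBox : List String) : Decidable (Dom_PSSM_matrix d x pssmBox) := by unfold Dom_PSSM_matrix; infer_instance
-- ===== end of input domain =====

-- B replaces A's tail recursion by a while loop and builds each row with ''.join
-- over enumerate; equally fast, shorter.  Both A and B append to pssmBox in place
-- (identically); the theorems are about the return value.

-- ===== PORT A =====
def PSSM_matrix (d : List String) (x : Int) (pssmBox : List String) : List String :=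
  let num := PySem.List.slice d (some (x + 3)) (some (x + 23))
  match PySem.List.pyGet? d (x + 1) with
  | none => pssmBox   -- IndexError in Python; excluded by Pre_
  | some num1 =>
    let st := num.foldl (fun (st : Int × String) j =>
        let count := st.1 + 1
        if count == 19 then
          (count, PySem.Str.join "" [st.2, PySem.Str.replace num1 ",\n" ""])
        else
          (count, PySem.Str.join "" [st.2, PySem.Str.replace j ",\n" ""]))
      (0, "")
    let box := pssmBox ++ [st.2]
    if x + 28 ≤ (d.length : Int) - 30 then PSSM_matrix d (x + 28) box else box
termination_by ((d.length : Int) - 2 - x).toNat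
decreasing_by omega

-- ===== PORT B =====
def PSSM_matrix_alt (d : List String) (x : Int) (pssmBox : List String) : List String :=
  match PySem.List.pyGet? d (x + 1) with
  | none => pssmBox   -- IndexError in Python; excluded by Pre_
  | some num1 =>
    let num := PySem.List.slice d (some (x + 3)) (some (x + 23))
    let box := pssmBox ++
      [PySem.Str.join "" ((PySem.List.enumerate num 0).map
        (fun p => PySem.Str.replace (if p.1 == 18 then num1 else p.2) ",\n" ""))]
    if x + 28 ≤ (d.length : Int) - 30 then PSSM_matrix_alt d (x + 28) box
    else box
termination_by ((d.length : Int) - 2 - x).toNat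
decreasing_by omega

-- ===== PRECONDITION & SPEC =====
-- A raises IndexError iff the initial index x+1 is out of Python range for d
-- (indices deeper in the recursion are always in range when this one is).
def Pre_PSSM_matrix (d : List String) (x : Int) (pssmBox : List String) : Prop :=
  PySem.Raise.InRange d.length (x + 1)
instance (d : List String) (x : Int) (pssmBox : List String) : Decidable (Pre_PSSM_matrix d x pssmBox) := by unfold Pre_PSSM_matrix; infer_instance

def pvWitness_PSSM_matrix : List String × Int × List String := (["a,\nb", "c"], 0, ["z"])

def Spec_PSSM_matrix (d : List String) (x : Int) (pssmBox : List String) (out : List String) : Prop := out = PSSM_matrix_alt d x pssmBox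
instance (d : List String) (x : Int) (pssmBox : List String) (out : List String) : Decidable (Spec_PSSM_matrix d x pssmBox out) := by unfold Spec_PSSM_matrix; infer_instance

-- ===== CLAIM (what is proved, stated in full; the proofs are below) =====
def Claim_equal_PSSM_matrix : Prop := ∀ (d : List String) (x : Int) (pssmBox : List String), Dom_PSSM_matrix d x pssmBox → Pre_PSSM_matrix d x pssmBox → Spec_PSSM_matrix d x pssmBox (PSSM_matrix d x pssmBox)

-- ===== LEMMAS AND PROOFS =====

theorem pssm_chars_join_nil : ∀ (L : List (List Char)), PySem.Chars.join [] L = L.flatten := by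
  intro L
  induction L with
  | nil => simp [PySem.Chars.join, List.intercalate]
  | cons a rest ih =>
    cases rest with
    | nil => simp [PySem.Chars.join, List.intercalate]
    | cons b r =>
      rw [PySem.Chars.join_cons_cons, ih]
      simp

theorem pssm_join_join (s t : String) (L : List String) :
    PySem.Str.join "" (PySem.Str.join "" [s, t] :: L) = PySem.Str.join "" (s :: t :: L) := by
  apply String.toList_inj.mp
  simp [PySem.Str.toList_join, pssm_chars_join_nil]

-- A's counter/accumulator fold builds the same row string as B's join-over-enumerate.
theorem pssm_fold_eq (num1 : String) : ∀ (num : List String) (c : Int) (s : String),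
    (num.foldl (fun (st : Int × String) j =>
        let count := st.1 + 1
        if count == 19 then
          (count, PySem.Str.join "" [st.2, PySem.Str.replace num1 ",\n" ""])
        else
          (count, PySem.Str.join "" [st.2, PySem.Str.replace j ",\n" ""]))
      (c, s)).2
    = PySem.Str.join "" (s :: (PySem.List.enumerate num c).map
        (fun p => PySem.Str.replace (if p.1 + 1 == 19 then num1 else p.2) ",\n" "")) := by
  intro num
  induction num with
  | nil => intro c s; simp [PySem.List.enumerate, PySem.Str.join]
  | cons j rest ih =>
    intro c s
    rw [List.foldl_cons, PySem.List.enumerate_cons, List.map_cons]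
    by_cases h : c + 1 = 19
    · simp only [h, beq_self_eq_true, if_pos]
      rw [ih, pssm_join_join]
    · rw [if_neg (by simpa using h)]
      simp only [show (((c, j).1 + 1 == 19) = true) = False by simpa using h, if_false]
      rw [ih, pssm_join_join]

theorem pssm_join_nil_head (L : List String) :
    PySem.Str.join "" ("" :: L) = PySem.Str.join "" L := by
  apply String.toList_inj.mp
  simp [PySem.Str.toList_join, pssm_chars_join_nil]

theorem pssm_row_eq (num : List String) (num1 : String) :
    (num.foldl (fun (st : Int × String) j =>
        let count := st.1 + 1
        if count == 19 then
          (count, PySem.Str.join "" [st.2, PySem.Str.replace num1 ",\n" ""])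
        else
          (count, PySem.Str.join "" [st.2, PySem.Str.replace j ",\n" ""]))
      (0, "")).2
    = PySem.Str.join "" ((PySem.List.enumerate num 0).map
        (fun p => PySem.Str.replace (if p.1 == 18 then num1 else p.2) ",\n" "")) := by
  rw [pssm_fold_eq, pssm_join_nil_head]
  congr 1
  apply List.map_congr_left
  intro p _
  congr 1
  by_cases h : p.1 = 18
  · simp [h]
  · rw [if_neg (by simpa using show ¬ p.1 + 1 = 19 by omega), if_neg (by simpa using h)]

theorem pssm_main : ∀ (d : List String) (x : Int) (pssmBox : List String),
    PSSM_matrix d x pssmBox = PSSM_matrix_alt d x pssmBox := by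
  intro d x box
  have key : ∀ (n : Nat) (x : Int) (box : List String),
      ((d.length : Int) - 2 - x).toNat ≤ n →
      PSSM_matrix d x box = PSSM_matrix_alt d x box := by
    intro n
    induction n with
    | zero =>
      intro x box hx
      rw [PSSM_matrix, PSSM_matrix_alt]
      cases hget : PySem.List.pyGet? d (x + 1) with
      | none => simp [hget]
      | some num1 =>
        simp only [hget]
        rw [pssm_row_eq]
        rw [if_neg (by omega), if_neg (by omega)]
    | succ n ih =>
      intro x box hx
      rw [PSSM_matrix, PSSM_matrix_alt]
      cases hget : PySem.List.pyGet? d (x + 1) with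
      | none => simp [hget]
      | some num1 =>
        simp only [hget]
        rw [pssm_row_eq]
        by_cases hg : x + 28 ≤ (d.length : Int) - 30
        · rw [if_pos hg, if_pos hg]
          exact ih (x + 28) _ (by omega)
        · rw [if_neg hg, if_neg hg]
  exact key _ x box le_rfl

-- ===== VERDICT (by name: the statement is the Claim_ definition above) =====
theorem PSSM_matrix_spec : Claim_equal_PSSM_matrix := by
  intro d x pssmBox _ _
  exact pssm_main d x pssmBox
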